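-- pv_equiv track=rewrite | github.com/ConstantineLignos/WordSegmentation | tools/esp_syll.py | esp_split_vowels
-- ===== SOURCE A (Python) =====
-- ESP_VOWELS = set(('a', 'e', 'i', 'o', 'u'))
--
-- ESP_STRONG_VOWELS = set(('a', 'e', 'o'))
--
-- def esp_split_vowels(sylls, stress):
--     """Clean up a syllabification by separating adjacent vowels where needed."""
--     split_sylls = []
--
--     for syll in sylls:
--         curr_syll = []
--         last_vowel = None
--
--         # Find adjacent vowels and split them if needed
--         for char in syll:
--             if char in ESP_VOWELS:
--                 if last_vowel:
--                     if ((char in ESP_STRONG_VOWELS and last_vowel in ESP_STRONG_VOWELS) or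
--                         (char == last_vowel)):
--                         # If both vowels are strong or they are the same
--                         # vowel always split and reset
--                         split_sylls.append(curr_syll)
--                         curr_syll = []
--                     elif stress and len(sylls) < len(stress):
--                         # If one is strong, consult the stress, and add
--                         # a break if we need one
--                         # Note- we don't update our syllable count based on
--                         # splits we added to make sure we can explicitly spot
--                         # any cases where we add too many splits
--                         # Split and reset if we need to make another syll
--                         split_sylls.append(curr_syll)
--                         curr_syll = []
--
--                     # The original algorithm involved a "weak vowel" case,
--                     # but they are all replaced by glides in pronunciation
--                     # so it is unnecessary
--
--                 # Always update the last vowel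
--                 last_vowel = char
--
--             # Always add the newest char to curr_syll
--             curr_syll.append(char)
--
--         split_sylls.append(tuple(curr_syll))
--
--     return tuple(split_sylls)
-- ===== SOURCE B (Python) =====
-- ESP_VOWELS = set(('a', 'e', 'i', 'o', 'u'))
--
-- ESP_STRONG_VOWELS = set(('a', 'e', 'o'))
--
-- def esp_split_vowels(sylls, stress):
--     """Two-phase rewrite: per syllable, a counting pass records the segment
--     lengths at the required break points, then a chopping pass slices the
--     syllable by those lengths (last piece emitted as a tuple)."""
--     need = stress is not None and len(sylls) < len(stress)
--     out = []
--     for syll in sylls: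
--         # Pass 1: segment lengths.
--         lens = []
--         seg_len = 0
--         last_vowel = None
--         for char in syll:
--             if char in ESP_VOWELS:
--                 if last_vowel is not None and (
--                         (char in ESP_STRONG_VOWELS and last_vowel in ESP_STRONG_VOWELS)
--                         or char == last_vowel
--                         or need):
--                     lens.append(seg_len)
--                     seg_len = 0
--                 last_vowel = char
--             seg_len += 1
--         # Pass 2: chop.
--         rest = list(syll)
--         for n in lens:
--             out.append(rest[:n])
--             rest = rest[n:]
--         out.append(tuple(rest))
--     return tuple(out)
-- ===== Notes on version B (the rewrite author's own statement) =====
-- stated objective: alternative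
-- what changed: Replaces A's single emit-as-you-go pass (which accumulates character buffers and appends them to the output at each break) with a two-phase algorithm per syllable: a counting pass that only records segment lengths at break points, then a chopping pass that slices the syllable by those lengths.
import Mathlib
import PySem

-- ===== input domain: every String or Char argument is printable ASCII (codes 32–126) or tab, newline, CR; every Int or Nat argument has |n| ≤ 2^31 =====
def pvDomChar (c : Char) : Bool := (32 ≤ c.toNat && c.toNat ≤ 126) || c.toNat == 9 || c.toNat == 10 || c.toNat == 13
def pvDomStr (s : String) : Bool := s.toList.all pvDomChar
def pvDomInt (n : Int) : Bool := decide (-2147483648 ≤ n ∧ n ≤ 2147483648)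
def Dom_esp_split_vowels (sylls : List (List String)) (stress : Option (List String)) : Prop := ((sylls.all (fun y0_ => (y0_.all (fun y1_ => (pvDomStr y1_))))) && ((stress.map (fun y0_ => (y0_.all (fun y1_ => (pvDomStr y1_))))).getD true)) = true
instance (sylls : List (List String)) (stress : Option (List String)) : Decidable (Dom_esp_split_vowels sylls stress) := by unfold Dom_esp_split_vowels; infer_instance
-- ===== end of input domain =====

-- B replaces A's single emit-as-you-go pass with a counting pass (segment lengths at break
-- points) followed by a chopping pass per syllable; objective: alternative decomposition.


-- shared module constants ESP_VOWELS / ESP_STRONG_VOWELS (both Python files define them)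
def espVowels : List String := ["a", "e", "i", "o", "u"]
def espStrong : List String := ["a", "e", "o"]

-- ===== PORT A =====
def esp_split_vowels (sylls : List (List String)) (stress : Option (List String)) : List (List String) :=
  sylls.foldl (fun split_sylls syll =>
    -- inner loop: state = (split_sylls, curr_syll, last_vowel)
    let r := syll.foldl
      (fun (st : List (List String) × List String × Option String) char =>
        let ss := st.1
        let cs := st.2.1
        let lv := st.2.2
        if espVowels.contains char then
          let st' :=
            match lv with
            | some l =>
              if (espStrong.contains char && espStrong.contains l) || char == l then
                (ss ++ [cs], ([] : List String))
              else if (match stress with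
                       | none => false
                       | some s => !s.isEmpty && decide (sylls.length < s.length)) then
                (ss ++ [cs], ([] : List String))
              else (ss, cs)
            | none => (ss, cs)
          (st'.1, st'.2 ++ [char], some char)
        else (ss, cs ++ [char], lv))
      (split_sylls, ([] : List String), (none : Option String))
    r.1 ++ [r.2.1]) []

-- ===== PORT B =====
def esp_split_vowels_alt (sylls : List (List String)) (stress : Option (List String)) : List (List String) :=
  let need : Bool := match stress with
    | none => false
    | some s => decide (sylls.length < s.length)
  sylls.foldl (fun out syll =>
    -- pass 1: state = (lens, seg_len, last_vowel)
    let p1 := syll.foldl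
      (fun (st : List Nat × Nat × Option String) char =>
        let lens := st.1
        let segLen := st.2.1
        let lv := st.2.2
        if espVowels.contains char then
          let st' :=
            if (match lv with
                | some l => (espStrong.contains char && espStrong.contains l) || char == l || need
                | none => false) then
              (lens ++ [segLen], 0)
            else (lens, segLen)
          (st'.1, st'.2 + 1, some char)
        else (lens, segLen + 1, lv))
      (([] : List Nat), 0, (none : Option String))
    -- pass 2: chop; rest[:n] / rest[n:] with n : Nat ported as take/drop (exact: Python
    -- slices with a nonnegative index clamp at the length exactly as take/drop do)
    let chop := p1.1.foldl
      (fun (st : List (List String) × List String) n =>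
        (st.1 ++ [st.2.take n], st.2.drop n)) (out, syll)
    chop.1 ++ [chop.2]) []

-- ===== PRECONDITION & SPEC =====
def Spec_esp_split_vowels (sylls : List (List String)) (stress : Option (List String)) (out : List (List String)) : Prop := out = esp_split_vowels_alt sylls stress
instance (sylls : List (List String)) (stress : Option (List String)) (out : List (List String)) : Decidable (Spec_esp_split_vowels sylls stress out) := by unfold Spec_esp_split_vowels; infer_instance

-- ===== CLAIM (what is proved, stated in full; the proofs are below) =====
def Claim_equal_esp_split_vowels : Prop := ∀ (sylls : List (List String)) (stress : Option (List String)), Dom_esp_split_vowels sylls stress → Spec_esp_split_vowels sylls stress (esp_split_vowels sylls stress)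

-- ===== LEMMAS AND PROOFS =====

-- break decision shared by both inner loops once A's stress test is normalised
def pvBrk (need : Bool) (lv : Option String) (c : String) : Bool :=
  match lv with
  | some l => (espStrong.contains c && espStrong.contains l) || c == l || need
  | none => false

-- reference splitter: (finished segments, current segment)
def pvChunks (need : Bool) : List String → Option String → List String → List (List String) × List String
  | cs, _, [] => ([], cs)
  | cs, lv, c :: rest =>
    if espVowels.contains c then
      if pvBrk need lv c then
        let r := pvChunks need [c] (some c) rest
        (cs :: r.1, r.2)
      else pvChunks need (cs ++ [c]) (some c) rest
    else pvChunks need (cs ++ [c]) lv rest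

-- segment lengths (the lengths of pvChunks' pieces)
def pvLens (need : Bool) : Nat → Option String → List String → List Nat × Nat
  | n, _, [] => ([], n)
  | n, lv, c :: rest =>
    if espVowels.contains c then
      if pvBrk need lv c then
        let r := pvLens need 1 (some c) rest
        (n :: r.1, r.2)
      else pvLens need (n + 1) (some c) rest
    else pvLens need (n + 1) lv rest

-- the last-vowel state after a scan
def pvLastV : Option String → List String → Option String
  | lv, [] => lv
  | lv, c :: rest => pvLastV (if espVowels.contains c then some c else lv) rest

-- A's inner-loop step, normalised to pvBrk
def pvStepA (need : Bool) (st : List (List String) × List String × Option String) (char : String) :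
    List (List String) × List String × Option String :=
  if espVowels.contains char then
    if pvBrk need st.2.2 char then (st.1 ++ [st.2.1], [char], some char)
    else (st.1, st.2.1 ++ [char], some char)
  else (st.1, st.2.1 ++ [char], st.2.2)

-- B's pass-1 step, normalised to pvBrk
def pvStepB (need : Bool) (st : List Nat × Nat × Option String) (char : String) :
    List Nat × Nat × Option String :=
  if espVowels.contains char then
    if pvBrk need st.2.2 char then (st.1 ++ [st.2.1], 1, some char)
    else (st.1, st.2.1 + 1, some char)
  else (st.1, st.2.1 + 1, st.2.2)

theorem pvFoldA (need : Bool) (t : List String) :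
    ∀ (ss : List (List String)) (cs : List String) (lv : Option String),
      t.foldl (pvStepA need) (ss, cs, lv) =
        (ss ++ (pvChunks need cs lv t).1, (pvChunks need cs lv t).2, pvLastV lv t) := by
  induction t with
  | nil => intro ss cs lv; simp [pvChunks, pvLastV]
  | cons c rest ih =>
    intro ss cs lv
    by_cases hv : c ∈ espVowels
    · by_cases hb : pvBrk need lv c = true
      · simp [pvStepA, pvChunks, pvLastV, hv, hb, ih]
      · simp [pvStepA, pvChunks, pvLastV, hv, hb, ih]
    · simp [pvStepA, pvChunks, pvLastV, hv, ih]

theorem pvFoldB (need : Bool) (t : List String) :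
    ∀ (lens : List Nat) (n : Nat) (lv : Option String),
      t.foldl (pvStepB need) (lens, n, lv) =
        (lens ++ (pvLens need n lv t).1, (pvLens need n lv t).2, pvLastV lv t) := by
  induction t with
  | nil => intro lens n lv; simp [pvLens, pvLastV]
  | cons c rest ih =>
    intro lens n lv
    by_cases hv : c ∈ espVowels
    · by_cases hb : pvBrk need lv c = true
      · simp [pvStepB, pvLens, pvLastV, hv, hb, ih]
      · simp [pvStepB, pvLens, pvLastV, hv, hb, ih]
    · simp [pvStepB, pvLens, pvLastV, hv, ih]

-- pass 2 realises pvChunks from the segment lengths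
theorem pvChop (need : Bool) (t : List String) :
    ∀ (cs : List String) (lv : Option String) (out : List (List String)),
      ((pvLens need cs.length lv t).1).foldl
          (fun (st : List (List String) × List String) n =>
            (st.1 ++ [st.2.take n], st.2.drop n)) (out, cs ++ t) =
        (out ++ (pvChunks need cs lv t).1, (pvChunks need cs lv t).2) := by
  induction t with
  | nil => intro cs lv out; simp [pvLens, pvChunks]
  | cons c rest ih =>
    intro cs lv out
    by_cases hv : c ∈ espVowels
    · by_cases hb : pvBrk need lv c = true
      · have e1 : (cs ++ c :: rest).take cs.length = cs := List.take_left
        have e2 : (cs ++ c :: rest).drop cs.length = c :: rest := List.drop_left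
        have h2 := ih [c] (some c) (out ++ [cs])
        simp only [List.length_cons, List.length_nil, List.singleton_append,
          Nat.zero_add] at h2
        simp [pvLens, pvChunks, hv, hb, e1, e2, h2]
      · have h2 := ih (cs ++ [c]) (some c) out
        simp only [List.length_append, List.length_cons, List.length_nil,
          List.append_assoc, List.singleton_append, Nat.zero_add] at h2
        simp [pvLens, pvChunks, hv, hb, h2]
    · have h2 := ih (cs ++ [c]) lv out
      simp only [List.length_append, List.length_cons, List.length_nil,
        List.append_assoc, List.singleton_append, Nat.zero_add] at h2
      simp [pvLens, pvChunks, hv, h2]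

-- both per-syllable bodies produce out ++ pieces ++ [last piece]
theorem pvMain (need : Bool) (l : List (List String)) :
    ∀ (acc : List (List String)),
      l.foldl (fun acc syll =>
          let r := syll.foldl (pvStepA need) (acc, ([] : List String), (none : Option String))
          r.1 ++ [r.2.1]) acc =
      l.foldl (fun acc syll =>
          let p1 := syll.foldl (pvStepB need) (([] : List Nat), 0, (none : Option String))
          let chop := p1.1.foldl
            (fun (st : List (List String) × List String) n =>
              (st.1 ++ [st.2.take n], st.2.drop n)) (acc, syll)
          chop.1 ++ [chop.2]) acc := by
  induction l with
  | nil => intro acc; rfl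
  | cons syll rest ih =>
    intro acc
    simp only [List.foldl_cons]
    have hA := pvFoldA need syll acc [] none
    have hB := pvFoldB need syll [] 0 none
    have hC := pvChop need syll [] none acc
    simp only [List.nil_append, List.length_nil] at hB hC
    rw [hA, hB, hC, ih]

-- ===== VERDICT (by name: the statement is the Claim_ definition above) =====
theorem esp_split_vowels_spec : Claim_equal_esp_split_vowels := by
  intro sylls stress _
  unfold Spec_esp_split_vowels esp_split_vowels esp_split_vowels_alt
  cases stress with
  | none =>
    dsimp only
    have hA : (fun (st : List (List String) × List String × Option String) char =>
        if espVowels.contains char then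
          let st' :=
            match st.2.2 with
            | some l =>
              if (espStrong.contains char && espStrong.contains l) || char == l then
                (st.1 ++ [st.2.1], ([] : List String))
              else if false then (st.1 ++ [st.2.1], ([] : List String))
              else (st.1, st.2.1)
            | none => (st.1, st.2.1)
          (st'.1, st'.2 ++ [char], some char)
        else (st.1, st.2.1 ++ [char], st.2.2)) = pvStepA false := by
      funext st char
      obtain ⟨ss, cs, lv⟩ := st
      cases lv with
      | none => by_cases hv : char ∈ espVowels <;> simp [pvStepA, pvBrk, hv]
      | some l =>
        by_cases hv : char ∈ espVowels
        · by_cases h1 : char ∈ espStrong ∧ l ∈ espStrong ∨ char = l <;>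
            simp [pvStepA, pvBrk, hv, h1]
        · simp [pvStepA, hv]
    have hB : (fun (st : List Nat × Nat × Option String) char =>
        if espVowels.contains char then
          let st' :=
            if (match st.2.2 with
                | some l => (espStrong.contains char && espStrong.contains l) || char == l || false
                | none => false) then
              (st.1 ++ [st.2.1], 0)
            else (st.1, st.2.1)
          (st'.1, st'.2 + 1, some char)
        else (st.1, st.2.1 + 1, st.2.2)) = pvStepB false := by
      funext st char
      obtain ⟨lens, n, lv⟩ := st
      cases lv with
      | none => by_cases hv : char ∈ espVowels <;> simp [pvStepB, pvBrk, hv]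
      | some l =>
        by_cases hv : char ∈ espVowels
        · by_cases h1 : char ∈ espStrong ∧ l ∈ espStrong ∨ char = l <;>
            simp [pvStepB, pvBrk, hv, h1]
        · simp [pvStepB, hv]
    rw [hA, hB]
    exact pvMain false sylls []
  | some s =>
    dsimp only
    have hs : (!s.isEmpty && decide (sylls.length < s.length)) = decide (sylls.length < s.length) := by
      cases s <;> simp
    have hA : (fun (st : List (List String) × List String × Option String) char =>
        if espVowels.contains char then
          let st' :=
            match st.2.2 with
            | some l =>
              if (espStrong.contains char && espStrong.contains l) || char == l then
                (st.1 ++ [st.2.1], ([] : List String))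
              else if (!s.isEmpty && decide (sylls.length < s.length)) then
                (st.1 ++ [st.2.1], ([] : List String))
              else (st.1, st.2.1)
            | none => (st.1, st.2.1)
          (st'.1, st'.2 ++ [char], some char)
        else (st.1, st.2.1 ++ [char], st.2.2)) = pvStepA (decide (sylls.length < s.length)) := by
      funext st char
      obtain ⟨ss, cs, lv⟩ := st
      rw [hs]
      cases lv with
      | none => by_cases hv : char ∈ espVowels <;> simp [pvStepA, pvBrk, hv]
      | some l =>
        by_cases hv : char ∈ espVowels
        · by_cases h1 : char ∈ espStrong ∧ l ∈ espStrong ∨ char = l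
          · simp [pvStepA, pvBrk, hv, h1]
          · by_cases h2 : sylls.length < s.length <;> simp [pvStepA, pvBrk, hv, h1, h2]
        · simp [pvStepA, hv]
    have hB : (fun (st : List Nat × Nat × Option String) char =>
        if espVowels.contains char then
          let st' :=
            if (match st.2.2 with
                | some l => (espStrong.contains char && espStrong.contains l) || char == l ||
                    decide (sylls.length < s.length)
                | none => false) then
              (st.1 ++ [st.2.1], 0)
            else (st.1, st.2.1)
          (st'.1, st'.2 + 1, some char)
        else (st.1, st.2.1 + 1, st.2.2)) = pvStepB (decide (sylls.length < s.length)) := by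
      funext st char
      obtain ⟨lens, n, lv⟩ := st
      cases lv with
      | none => by_cases hv : char ∈ espVowels <;> simp [pvStepB, pvBrk, hv]
      | some l =>
        by_cases hv : char ∈ espVowels
        · by_cases h1 : char ∈ espStrong ∧ l ∈ espStrong ∨ char = l
          · simp [pvStepB, pvBrk, hv, h1]
          · by_cases h2 : sylls.length < s.length <;> simp [pvStepB, pvBrk, hv, h1, h2]
        · simp [pvStepB, hv]
    rw [hA, hB]
    exact pvMain (decide (sylls.length < s.length)) sylls []
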